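-- pv_equiv track=rewrite | github.com/iangregson/advent-of-code | 2020/day/17/solution.py | next_state
-- ===== SOURCE A (Python) =====
-- from collections import namedtuple, defaultdict
--
-- P = namedtuple('P', ['x','y','z','w'])
--
-- def get_neighbors(cell_pos):
--   positions = []
--   X, Y, Z, W = cell_pos
--   for w in range(-1, 2):
--     for z in range(-1, 2):
--       for y in range(-1, 2):
--         for x in range(-1, 2):
--           p = P(X+x, Y+y, Z+z, W+w)
--           if p != cell_pos:
--             positions.append(p)
--
--   return positions
--
-- def next_state(prev_state):
--     neighbor_count = {}
--
--     # Find each active coordinate, and update its neighbors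
--     for this_coord in prev_state:
--         if prev_state[this_coord] == '#':
--             neighbor_list = get_neighbors(this_coord)
--             for this_neighbor in neighbor_list:
--                 # If this neighbor hasn't been added, add it
--                 try:
--                     neighbor_count[this_neighbor] += 1
--                 except KeyError:
--                     neighbor_count[this_neighbor] = 1
--
--     n_map = defaultdict(lambda: '.')
--     active_count = 0
--
--     # Go through each coord with active neighbors and see if it needs to change its state
--     for this_coord in neighbor_count:
--         # If the coord is newly viewed, then its initial state must be inactive.
--         try:
--             current_state = prev_state[this_coord]
--         except KeyError:
--             current_state = '.'
--         n_active_neighbors = neighbor_count[this_coord]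
--
--
--         if current_state == '#':
--           # If a cube is active and exactly 2 or 3 of its neighbors are also active,
--           # the cube remains active. Otherwise, the cube becomes inactive.
--           if n_active_neighbors == 2 or n_active_neighbors == 3:
--             current_state = '#'
--           else:
--             current_state = '.'
--         else:
--           # If a cube is inactive but exactly 3 of its neighbors are active,
--           # the cube becomes active. Otherwise, the cube remains inactive.
--           if n_active_neighbors == 3:
--             current_state = '#'
--           else:
--             current_state = '.'
--         n_map[this_coord] = current_state
--         if n_map[this_coord] == '#':
--             active_count += 1
--
--     return n_map
-- ===== SOURCE B (Python) =====
-- from collections import defaultdict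
--
-- def get_neighbors(cell_pos):
--   X, Y, Z, W = cell_pos
--   return [(X + x, Y + y, Z + z, W + w)
--           for w in (-1, 0, 1)
--           for z in (-1, 0, 1)
--           for y in (-1, 0, 1)
--           for x in (-1, 0, 1)
--           if (X + x, Y + y, Z + z, W + w) != cell_pos]
--
-- def next_state(prev_state):
--     # gather-and-count: instead of scattering +1 into a counter dict,
--     # count each candidate's active neighbors directly against a set.
--     active = {c for c, v in prev_state.items() if v == '#'}
--     candidates = dict.fromkeys(n for c, v in prev_state.items() if v == '#'
--                                  for n in get_neighbors(c))
--     n_map = defaultdict(lambda: '.')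
--     for c in candidates:
--         n = sum(1 for p in get_neighbors(c) if p in active)
--         if c in active:
--             n_map[c] = '#' if n == 2 or n == 3 else '.'
--         else:
--             n_map[c] = '#' if n == 3 else '.'
--     return n_map
-- ===== Notes on version B (the rewrite author's own statement) =====
-- stated objective: alternative
-- what changed: Replaces A's scatter phase (each active cell increments a try/except counter dict at its 80 neighbors, then a pass over the counter) by a gather phase: build an active set once, take the candidate keys as dict.fromkeys of the active cells' neighbors, and for each candidate count its active neighbors directly by membership in the set.
import Mathlib
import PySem

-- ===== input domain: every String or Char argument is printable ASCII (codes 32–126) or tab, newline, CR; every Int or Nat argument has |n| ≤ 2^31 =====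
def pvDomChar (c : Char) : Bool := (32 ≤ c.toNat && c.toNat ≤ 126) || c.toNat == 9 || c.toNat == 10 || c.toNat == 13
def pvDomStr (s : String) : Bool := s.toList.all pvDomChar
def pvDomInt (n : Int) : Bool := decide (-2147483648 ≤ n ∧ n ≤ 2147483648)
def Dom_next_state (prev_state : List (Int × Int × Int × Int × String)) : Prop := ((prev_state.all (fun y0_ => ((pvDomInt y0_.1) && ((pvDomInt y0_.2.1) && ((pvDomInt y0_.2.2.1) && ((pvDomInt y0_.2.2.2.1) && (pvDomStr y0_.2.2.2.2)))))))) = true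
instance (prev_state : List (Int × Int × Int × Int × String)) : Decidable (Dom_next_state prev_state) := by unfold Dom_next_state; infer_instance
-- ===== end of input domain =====

-- B replaces A's scatter phase (every active cell try/except-increments a counter dict at each
-- of its 80 neighbors) by a gather phase (each candidate cell counts its own active neighbors
-- against a set built once); same cost class, different algorithm ("alternative").
-- Both Pythons take and return a dict keyed by 4-tuples; the flattened 5-tuple list is the
-- association-list encoding of that dict (toPairs/ofPair below decode/encode it, shared by both ports).

def toPairs (l : List (Int × Int × Int × Int × String)) : List ((Int × Int × Int × Int) × String) :=
  l.map (fun e => ((e.1, e.2.1, e.2.2.1, e.2.2.2.1), e.2.2.2.2))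

def ofPair (p : (Int × Int × Int × Int) × String) : Int × Int × Int × Int × String :=
  (p.1.1, p.1.2.1, p.1.2.2.1, p.1.2.2.2, p.2)

-- ===== PORT A =====

def get_neighbors (cell_pos : Int × Int × Int × Int) : List (Int × Int × Int × Int) :=
  (PySem.List.pyRange (-1) 2 1).foldl (fun positions w =>
    (PySem.List.pyRange (-1) 2 1).foldl (fun positions z =>
      (PySem.List.pyRange (-1) 2 1).foldl (fun positions y =>
        (PySem.List.pyRange (-1) 2 1).foldl (fun positions x =>
          let p : Int × Int × Int × Int :=
            (cell_pos.1 + x, cell_pos.2.1 + y, cell_pos.2.2.1 + z, cell_pos.2.2.2 + w)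
          if p != cell_pos then positions ++ [p] else positions) positions) positions) positions) []

-- (A's `active_count` is computed but never used by the returned value; not carried here.)
def next_state (prev_state : List (Int × Int × Int × Int × String)) : List (Int × Int × Int × Int × String) :=
  let prev : PySem.Dict (Int × Int × Int × Int) String := PySem.Dict.ofList (toPairs prev_state)
  let neighbor_count : PySem.Dict (Int × Int × Int × Int) Int :=
    prev.keys.foldl (fun neighbor_count this_coord =>
      if prev.getD this_coord "." == "#" then
        (get_neighbors this_coord).foldl (fun neighbor_count this_neighbor =>
          neighbor_count.insert this_neighbor (neighbor_count.getD this_neighbor 0 + 1))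
          neighbor_count
      else neighbor_count) PySem.Dict.empty
  let n_map : PySem.Dict (Int × Int × Int × Int) String :=
    neighbor_count.keys.foldl (fun n_map this_coord =>
      let current_state := prev.getD this_coord "."
      let n_active_neighbors := neighbor_count.getD this_coord 0
      let current_state :=
        if current_state == "#" then
          (if n_active_neighbors == 2 || n_active_neighbors == 3 then "#" else ".")
        else
          (if n_active_neighbors == 3 then "#" else ".")
      n_map.insert this_coord current_state) PySem.Dict.empty
  n_map.items.map ofPair

-- ===== PORT B =====

def neighbors_of (cell_pos : Int × Int × Int × Int) : List (Int × Int × Int × Int) :=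
  ([-1, 0, 1] : List Int).flatMap (fun w =>
    ([-1, 0, 1] : List Int).flatMap (fun z =>
      ([-1, 0, 1] : List Int).flatMap (fun y =>
        ([-1, 0, 1] : List Int).filterMap (fun x =>
          let p : Int × Int × Int × Int :=
            (cell_pos.1 + x, cell_pos.2.1 + y, cell_pos.2.2.1 + z, cell_pos.2.2.2 + w)
          if p != cell_pos then some p else none))))

def next_state_alt (prev_state : List (Int × Int × Int × Int × String)) : List (Int × Int × Int × Int × String) :=
  let prev : PySem.Dict (Int × Int × Int × Int) String := PySem.Dict.ofList (toPairs prev_state)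
  let active : PySem.Set (Int × Int × Int × Int) :=
    PySem.Set.ofList ((prev.items.filter (fun p => p.2 == "#")).map (·.1))
  let candidates : List (Int × Int × Int × Int) :=
    PySem.List.dedup ((prev.items.filter (fun p => p.2 == "#")).flatMap (fun p => neighbors_of p.1))
  let n_map : PySem.Dict (Int × Int × Int × Int) String :=
    candidates.foldl (fun n_map c =>
      let n : Int := (neighbors_of c).foldl (fun acc p => if active.contains p then acc + 1 else acc) 0
      n_map.insert c
        (if active.contains c then (if n == 2 || n == 3 then "#" else ".")
         else (if n == 3 then "#" else "."))) PySem.Dict.empty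
  n_map.items.map ofPair

-- ===== PRECONDITION & SPEC =====
def Spec_next_state (prev_state : List (Int × Int × Int × Int × String)) (out : List (Int × Int × Int × Int × String)) : Prop := out = next_state_alt prev_state
instance (prev_state : List (Int × Int × Int × Int × String)) (out : List (Int × Int × Int × Int × String)) : Decidable (Spec_next_state prev_state out) := by unfold Spec_next_state; infer_instance

-- ===== CLAIM (what is proved, stated in full; the proofs are below) =====
def Claim_equal_next_state : Prop := ∀ (prev_state : List (Int × Int × Int × Int × String)), Dom_next_state prev_state → Spec_next_state prev_state (next_state prev_state)

-- ===== LEMMAS AND PROOFS =====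

-- a comprehension `[g x for x in l if p x]` is the filtered map
theorem filterMap_ite {α β : Type} (p : α → Bool) (g : α → β) (l : List α) :
    l.filterMap (fun x => if p x then some (g x) else none) = (l.filter p).map g := by
  induction l with
  | nil => rfl
  | cons a l ih => by_cases h : p a = true <;> simp [h, ih]

-- A's quadruple append loop and B's quadruple comprehension build the same neighbor list.
theorem get_neighbors_eq (c : Int × Int × Int × Int) : get_neighbors c = neighbors_of c := by
  have hr : PySem.List.pyRange (-1) 2 1 = [-1, 0, 1] := by decide
  unfold get_neighbors neighbors_of
  rw [hr]
  simp only [PySem.List.foldl_append_if, PySem.List.foldl_append_eq_flatMap, filterMap_ite,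
    List.nil_append]

-- translation offsets of the 80 neighbors
def addP (c d : Int × Int × Int × Int) : Int × Int × Int × Int :=
  (c.1 + d.1, c.2.1 + d.2.1, c.2.2.1 + d.2.2.1, c.2.2.2 + d.2.2.2)

def deltas : List (Int × Int × Int × Int) :=
  ([-1, 0, 1] : List Int).flatMap (fun w =>
    ([-1, 0, 1] : List Int).flatMap (fun z =>
      ([-1, 0, 1] : List Int).flatMap (fun y =>
        ([-1, 0, 1] : List Int).map (fun x => (x, y, z, w)))))

theorem neighbors_canon (c : Int × Int × Int × Int) :
    neighbors_of c = (deltas.filter (fun d => addP c d != c)).map (addP c) := by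
  unfold neighbors_of deltas
  simp only [List.filter_flatMap, List.map_flatMap, List.filter_map, List.map_map, filterMap_ite]
  simp [addP, Function.comp_def]

-- membership in the neighbor list is the Chebyshev-distance-1 relation
theorem mem_neighbors (c n : Int × Int × Int × Int) :
    n ∈ neighbors_of c ↔ (n ≠ c ∧ c.1 - 1 ≤ n.1 ∧ n.1 ≤ c.1 + 1 ∧ c.2.1 - 1 ≤ n.2.1 ∧ n.2.1 ≤ c.2.1 + 1 ∧
      c.2.2.1 - 1 ≤ n.2.2.1 ∧ n.2.2.1 ≤ c.2.2.1 + 1 ∧ c.2.2.2 - 1 ≤ n.2.2.2 ∧ n.2.2.2 ≤ c.2.2.2 + 1) := by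
  have hd : ∀ d ∈ deltas, -1 ≤ d.1 ∧ d.1 ≤ 1 ∧ -1 ≤ d.2.1 ∧ d.2.1 ≤ 1 ∧ -1 ≤ d.2.2.1 ∧
      d.2.2.1 ≤ 1 ∧ -1 ≤ d.2.2.2 ∧ d.2.2.2 ≤ 1 := by decide
  rw [neighbors_canon]
  constructor
  · intro hm
    obtain ⟨d, hdm, rfl⟩ := List.mem_map.mp hm
    obtain ⟨hdel, hne⟩ := List.mem_filter.mp hdm
    have := hd d hdel
    have hne' : addP c d ≠ c := by simpa [bne_iff_ne] using hne
    refine ⟨hne', ?_, ?_, ?_, ?_, ?_, ?_, ?_, ?_⟩ <;> simp [addP] <;> omega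
  · rintro ⟨hne, h1, h2, h3, h4, h5, h6, h7, h8⟩
    apply List.mem_map.mpr
    refine ⟨(n.1 - c.1, n.2.1 - c.2.1, n.2.2.1 - c.2.2.1, n.2.2.2 - c.2.2.2), ?_, ?_⟩
    · apply List.mem_filter.mpr
      have heq : addP c (n.1 - c.1, n.2.1 - c.2.1, n.2.2.1 - c.2.2.1, n.2.2.2 - c.2.2.2) = n := by
        obtain ⟨a, b, d, e⟩ := c; obtain ⟨a', b', d', e'⟩ := n
        simp [addP]
      refine ⟨?_, by rw [heq]; simpa [bne_iff_ne] using hne⟩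
      have hx1 : n.1 - c.1 = -1 ∨ n.1 - c.1 = 0 ∨ n.1 - c.1 = 1 := by omega
      have hx2 : n.2.1 - c.2.1 = -1 ∨ n.2.1 - c.2.1 = 0 ∨ n.2.1 - c.2.1 = 1 := by omega
      have hx3 : n.2.2.1 - c.2.2.1 = -1 ∨ n.2.2.1 - c.2.2.1 = 0 ∨ n.2.2.1 - c.2.2.1 = 1 := by omega
      have hx4 : n.2.2.2 - c.2.2.2 = -1 ∨ n.2.2.2 - c.2.2.2 = 0 ∨ n.2.2.2 - c.2.2.2 = 1 := by omega
      rcases hx1 with h|h|h <;> rw [h] <;> rcases hx2 with h|h|h <;> rw [h] <;>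
        rcases hx3 with h|h|h <;> rw [h] <;> rcases hx4 with h|h|h <;> rw [h] <;> decide
    · obtain ⟨a, b, d, e⟩ := c; obtain ⟨a', b', d', e'⟩ := n
      simp [addP]

theorem neighbors_symm (c n : Int × Int × Int × Int) : n ∈ neighbors_of c ↔ c ∈ neighbors_of n := by
  rw [mem_neighbors, mem_neighbors]
  constructor <;> (rintro ⟨h, hb⟩; refine ⟨fun he => h he.symm, ?_⟩; omega)

theorem neighbors_nodup (c : Int × Int × Int × Int) : (neighbors_of c).Nodup := by
  rw [neighbors_canon]
  refine List.Nodup.map ?_ (List.Nodup.filter _ (by decide))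
  intro d1 d2 h
  obtain ⟨a, b, d, e⟩ := c; obtain ⟨x1, y1, z1, w1⟩ := d1; obtain ⟨x2, y2, z2, w2⟩ := d2
  simp only [addP, Prod.mk.injEq] at h ⊢
  omega

-- A guarded inner accumulation loop is the plain loop over the flattened guarded list.
theorem nested_foldl {α β σ : Type} (l : List α) (p : α → Bool) (g : α → List β)
    (f : σ → β → σ) (init : σ) :
    l.foldl (fun s a => if p a then (g a).foldl f s else s) init
      = ((l.filter p).flatMap g).foldl f init := by
  induction l generalizing init with
  | nil => rfl
  | cons a l ih =>
    simp only [List.foldl_cons, List.filter_cons]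
    by_cases h : p a = true
    · simp [h, List.foldl_append, ih]
    · simp only [Bool.not_eq_true] at h
      simp [h, ih]

-- occurrences of c in a flatMap of duplicate-free blocks = number of blocks containing c
theorem count_flatMap_nodup {α : Type} [BEq α] [LawfulBEq α] (l : List α) (f : α → List α)
    (p : α → Bool) (c : α) (hf : ∀ a ∈ l, (f a).Nodup) (hp : ∀ a, p a = true ↔ c ∈ f a) :
    (l.flatMap f).count c = l.countP p := by
  induction l with
  | nil => rfl
  | cons a l ih =>
    simp only [List.flatMap_cons, List.count_append, List.countP_cons]
    rw [ih (fun x hx => hf x (List.mem_cons_of_mem _ hx))]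
    by_cases h : c ∈ f a
    · rw [List.count_eq_one_of_mem (hf a (List.mem_cons_self)) h, if_pos ((hp a).mpr h)]
      omega
    · rw [List.count_eq_zero_of_not_mem h, if_neg (fun hc => h ((hp a).mp hc))]
      omega

-- |l₁ ∩ l₂| counted from either side, for duplicate-free lists
theorem countP_mem_swap {α : Type} (l₁ l₂ : List α) (p q : α → Bool)
    (hp : ∀ a, p a = true ↔ a ∈ l₂) (hq : ∀ a, q a = true ↔ a ∈ l₁)
    (h₁ : l₁.Nodup) (h₂ : l₂.Nodup) :
    l₁.countP p = l₂.countP q := by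
  rw [List.countP_eq_length_filter, List.countP_eq_length_filter]
  apply List.Perm.length_eq
  rw [List.perm_ext_iff_of_nodup (h₁.filter _) (h₂.filter _)]
  intro a
  simp only [List.mem_filter, hp, hq]
  exact ⟨fun ⟨x, y⟩ => ⟨y, x⟩, fun ⟨x, y⟩ => ⟨y, x⟩⟩

-- a fold inserting distinct keys into an empty dict is the item list itself
theorem foldl_insert_empty_items {κ : Type} [BEq κ] [LawfulBEq κ] (f : κ → String) (l : List κ)
    (hl : l.Nodup) :
    (List.foldl (fun m c => m.insert c (f c)) (PySem.Dict.empty : PySem.Dict κ String) l).items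
      = l.map (fun c => (c, f c)) := by
  have h := PySem.Dict.items_foldl_insert_fresh l (fun c => c) f PySem.Dict.empty
    (fun a _ => PySem.Dict.contains_empty a) (by simpa using hl)
  simpa using h

theorem next_state_spec : Claim_equal_next_state := by
  intro ps _
  show next_state ps = next_state_alt ps
  unfold next_state next_state_alt
  simp only []
  set prev : PySem.Dict (Int × Int × Int × Int) String := PySem.Dict.ofList (toPairs ps) with hprev
  have hnd : prev.keys.Nodup := PySem.Dict.nodup_keys_ofList _
  set act : List (Int × Int × Int × Int) := prev.keys.filter (fun c => prev.getD c "." == "#")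
    with hact
  have hactnd : act.Nodup := hnd.filter _
  have hitems : (prev.items.filter (fun p => p.2 == "#")).map (·.1) = act := by
    rw [PySem.Dict.items_eq_map_keys prev hnd ".", List.filter_map, List.map_map, hact]
    simp [Function.comp_def]
  set bigL : List (Int × Int × Int × Int) := act.flatMap neighbors_of with hbig
  -- A's scatter loop is the counter of the flattened neighbor list
  rw [nested_foldl prev.keys (fun c => prev.getD c "." == "#") get_neighbors
    (fun (nc : PySem.Dict (Int × Int × Int × Int) Int) n => nc.insert n (nc.getD n 0 + 1))
    PySem.Dict.empty,
    show get_neighbors = neighbors_of from funext get_neighbors_eq,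
    PySem.Dict.foldl_insert_getD_add_one_eq_counter, ← hact, ← hbig]
  -- B's candidate list
  have hcand : (prev.items.filter (fun p => p.2 == "#")).flatMap (fun p => neighbors_of p.1)
      = bigL := by
    rw [hbig, ← hitems, List.flatMap_map]
  rw [hcand, hitems, PySem.List.dedup_eq_ofList, PySem.Dict.keys_counter]
  -- both result folds insert distinct fresh keys
  rw [foldl_insert_empty_items _ _ (PySem.Set.nodup_ofList bigL),
    foldl_insert_empty_items _ _ (PySem.Set.nodup_ofList bigL),
    List.map_map, List.map_map]
  apply List.map_congr_left
  intro c _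
  have h1 : PySem.Set.contains (PySem.Set.ofList act) c = (prev.getD c "." == "#") := by
    rw [Bool.eq_iff_iff, PySem.Set.contains_iff, PySem.Set.mem_ofList, hact]
    simp only [List.mem_filter, beq_iff_eq]
    constructor
    · exact fun h => h.2
    · intro h
      refine ⟨?_, h⟩
      by_contra hk
      have hcf : prev.contains c = false := by
        rw [← Bool.not_eq_true, PySem.Dict.contains_iff_mem_keys]; exact hk
      rw [PySem.Dict.getD_of_not_contains prev "." hcf] at h
      exact absurd h (by decide)
  have h2 : (PySem.Dict.counter bigL).getD c 0
      = List.foldl (fun acc p => if PySem.Set.contains (PySem.Set.ofList act) p then acc + 1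
          else acc) 0 (neighbors_of c) := by
    rw [PySem.Dict.getD_counter, PySem.List.foldl_count_if, zero_add]
    congr 1
    rw [hbig, count_flatMap_nodup act neighbors_of (fun a => decide (a ∈ neighbors_of c)) c
      (fun a _ => neighbors_nodup a)
      (fun a => by rw [decide_eq_true_eq]; exact (neighbors_symm a c).symm)]
    exact countP_mem_swap act (neighbors_of c) _ _
      (fun a => by rw [decide_eq_true_eq])
      (fun a => (PySem.Set.contains_iff _ _).trans (PySem.Set.mem_ofList _ _))
      hactnd (neighbors_nodup c)
  simp only [Function.comp]
  rw [h1, h2]
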